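-- pv_equiv track=rewrite | github.com/Kortemme-Lab/match_ligand_binding_sites | matching_binding_sites/scripts/user_scripts_xingjie/plot_matched_binding_site_depths.py | get_binding_site_depth_scores
-- ===== SOURCE A (Python) =====
-- def get_binding_site_depth_scores(layers):
--     depth_scores = []
--
--     for l in layers:
--         depth_score = 0
--         for ll in l:
--             if ll == 'C':
--                 depth_score += 2
--             elif ll == 'B':
--                 depth_score += 1
--
--         depth_scores.append(depth_score)
--
--     return depth_scores
-- ===== SOURCE B (Python) =====
-- def get_binding_site_depth_scores(layers):
--     # String-surgery instead of accumulation: rewrite each 'C' as 'BB' so every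
--     # depth point becomes one 'B', then measure by length difference after
--     # deleting the 'B's. No per-character Python loop, no counters.
--     scores = []
--     for l in layers:
--         doubled = l.replace('C', 'BB')
--         scores.append(len(doubled) - len(doubled.replace('B', '')))
--     return scores
-- ===== Notes on version B (the rewrite author's own statement) =====
-- stated objective: alternative
-- what changed: Replaces the per-character branch-and-accumulate loop with string surgery: rewrite each 'C' as 'BB' so every point is one 'B', then obtain the score as the length drop when the 'B's are deleted (len(t) - len(t.replace('B',''))).
import Mathlib
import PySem

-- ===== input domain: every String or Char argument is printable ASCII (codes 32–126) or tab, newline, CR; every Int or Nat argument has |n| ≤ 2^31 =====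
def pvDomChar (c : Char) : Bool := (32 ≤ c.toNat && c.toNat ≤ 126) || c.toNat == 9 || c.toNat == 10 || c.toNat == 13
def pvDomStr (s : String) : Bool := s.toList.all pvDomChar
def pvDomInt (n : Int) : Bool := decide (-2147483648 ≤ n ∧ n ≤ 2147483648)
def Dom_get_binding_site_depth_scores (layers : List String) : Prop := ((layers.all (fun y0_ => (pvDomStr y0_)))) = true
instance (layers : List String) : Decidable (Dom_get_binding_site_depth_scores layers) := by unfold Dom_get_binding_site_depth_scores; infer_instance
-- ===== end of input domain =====

-- B: computes each score by string surgery — rewrite 'C' as 'BB', then take the length drop when the 'B's are deleted (alternative algorithm, same cost).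


-- ===== PORT A =====
def get_binding_site_depth_scores (layers : List String) : List Int :=
  layers.foldl (fun depth_scores l =>
    depth_scores ++ [l.toList.foldl (fun depth_score ll =>
      if ll == 'C' then depth_score + 2
      else if ll == 'B' then depth_score + 1
      else depth_score) (0 : Int)]) []

-- ===== PORT B =====
def get_binding_site_depth_scores_alt (layers : List String) : List Int :=
  layers.foldl (fun scores l =>
    let doubled := PySem.Str.replace l "C" "BB"
    scores ++ [(PySem.Chars.len doubled.toList : Int)
               - (PySem.Chars.len (PySem.Str.replace doubled "B" "").toList : Int)]) []

-- ===== PRECONDITION & SPEC =====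
def Spec_get_binding_site_depth_scores (layers : List String) (out : List Int) : Prop := out = get_binding_site_depth_scores_alt layers
instance (layers : List String) (out : List Int) : Decidable (Spec_get_binding_site_depth_scores layers out) := by unfold Spec_get_binding_site_depth_scores; infer_instance

-- ===== CLAIM =====
def Claim_equal_get_binding_site_depth_scores : Prop := ∀ (layers : List String), Dom_get_binding_site_depth_scores layers → Spec_get_binding_site_depth_scores layers (get_binding_site_depth_scores layers)

-- ===== LEMMAS AND PROOFS =====

-- replace with a single-char pattern acts like flatMap (full fuel suffices)
lemma replace_go_single (c : Char) (new : List Char) :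
    ∀ (l acc : List Char) (fuel : Nat), l.length ≤ fuel →
      PySem.Chars.replace.go [c] new fuel l acc
        = acc.reverse ++ l.flatMap (fun x => if x = c then new else [x]) := by
  intro l
  induction l with
  | nil =>
    intro acc fuel _
    cases fuel <;> simp [PySem.Chars.replace.go]
  | cons x t ih =>
    intro acc fuel hf
    cases fuel with
    | zero => simp at hf
    | succ n =>
      simp only [List.length_cons, Nat.succ_le_succ_iff] at hf
      by_cases hx : x = c
      · subst hx
        simp [PySem.Chars.replace.go, List.isPrefixOf, ih _ n hf]
      · have hx' : ¬ c = x := fun h => hx h.symm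
        simp [PySem.Chars.replace.go, List.isPrefixOf, hx', ih _ n hf, hx]

lemma replace_single (c : Char) (new l : List Char) :
    PySem.Chars.replace l [c] new = l.flatMap (fun x => if x = c then new else [x]) := by
  simp only [PySem.Chars.replace, List.isEmpty_cons, if_false, Bool.false_eq_true]
  exact (replace_go_single c new l [] l.length le_rfl).trans (by simp)

lemma inner_eq (l : List Char) (a : Int) :
    l.foldl (fun depth_score ll =>
      if ll == 'C' then depth_score + 2
      else if ll == 'B' then depth_score + 1
      else depth_score) a = a + 2 * (l.count 'C' : Int) + (l.count 'B' : Int) := by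
  induction l generalizing a with
  | nil => simp
  | cons x xs ih =>
    simp only [List.foldl_cons, ih, List.count_cons]
    by_cases hc : x = 'C' <;> by_cases hb : x = 'B' <;>
      simp [hc, hb] <;> push_cast <;> ring

-- length of the 'C'→'BB' rewrite
lemma length_doubled (l : List Char) :
    (l.flatMap (fun x => if x = 'C' then ['B','B'] else [x])).length
      = l.length + l.count 'C' := by
  induction l with
  | nil => rfl
  | cons x t ih =>
    by_cases hx : x = 'C' <;> simp [hx, ih, List.count_cons] <;> omega

-- the 'B'→'' rewrite is a filter, so its length is length minus count 'B'
lemma count_B_doubled (l : List Char) :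
    (l.flatMap (fun x => if x = 'C' then ['B','B'] else [x])).count 'B'
      = 2 * l.count 'C' + l.count 'B' := by
  induction l with
  | nil => rfl
  | cons x t ih =>
    by_cases hx : x = 'C' <;> by_cases hb : x = 'B' <;>
      simp [hx, hb, List.count_cons, ih] <;> omega

lemma length_filter_ne (d : List Char) :
    (d.flatMap (fun x => if x = 'B' then ([] : List Char) else [x])).length
      = d.length - d.count 'B' := by
  induction d with
  | nil => rfl
  | cons x t ih =>
    have hle : t.count 'B' ≤ t.length := List.count_le_length
    by_cases hb : x = 'B' <;> simp [hb, ih, List.count_cons] <;> omega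

lemma score_eq (l : List Char) :
    (PySem.Chars.len (PySem.Chars.replace l ['C'] ['B','B']) : Int)
      - (PySem.Chars.len (PySem.Chars.replace (PySem.Chars.replace l ['C'] ['B','B']) ['B'] []) : Int)
      = 2 * (l.count 'C' : Int) + (l.count 'B' : Int) := by
  rw [replace_single 'C' ['B','B'] l,
      replace_single 'B' [] _ ]
  simp only [PySem.Chars.len]
  rw [length_filter_ne, length_doubled]
  have h1 := count_B_doubled l
  have h2 : (l.flatMap (fun x => if x = 'C' then ['B','B'] else [x])).count 'B'
      ≤ (l.flatMap (fun x => if x = 'C' then ['B','B'] else [x])).length :=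
    List.count_le_length
  rw [length_doubled] at h2
  omega

-- ===== VERDICT =====
theorem get_binding_site_depth_scores_spec : Claim_equal_get_binding_site_depth_scores := by
  intro layers _
  unfold Spec_get_binding_site_depth_scores get_binding_site_depth_scores get_binding_site_depth_scores_alt
  rw [PySem.List.foldl_append_singleton_eq_map, PySem.List.foldl_append_singleton_eq_map]
  refine List.map_congr_left (fun l _ => ?_)
  rw [inner_eq]
  have hC : ("C" : String).toList = ['C'] := rfl
  have hBB : ("BB" : String).toList = ['B','B'] := rfl
  have hB : ("B" : String).toList = ['B'] := rfl
  have hE : ("" : String).toList = ([] : List Char) := rfl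
  simp only [PySem.Str.toList_replace, hC, hBB, hB, hE]
  have := score_eq l.toList
  omega
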